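-- pv_equiv track=rewrite | github.com/jbframe/big-equity | be.py | evaluate_high_hand
-- ===== SOURCE A (Python) =====
-- def evaluate_high_hand(hand):
--     ranks = {'2': 2, '3': 3, '4': 4, '5': 5, '6': 6, '7': 7, '8': 8, '9': 9,
--              'T': 10, 'J': 11, 'Q': 12, 'K': 13, 'A': 14}
--
--     parsed_hand = []
--     for card in hand:
--         if card.startswith('10'):
--             rank = 'T'  # Replace '10' with 'T'
--             suit = card[2]
--         else:
--             rank = card[0].upper()  # Make sure rank is uppercase
--             suit = card[1].upper()
--         parsed_hand.append((ranks[rank], suit))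
--
--     parsed_hand = sorted(parsed_hand, reverse=True)
--
--     rank_histogram = {}
--     suit_histogram = {}
--     for rank, suit in parsed_hand:
--         rank_histogram[rank] = rank_histogram.get(rank, 0) + 1
--         suit_histogram[suit] = suit_histogram.get(suit, 0) + 1
--
--     is_flush = any(count >= 5 for count in suit_histogram.values())
--     is_straight = False
--     rank_sorted = sorted(rank_histogram.keys(), reverse=True)
--     for i in range(len(rank_sorted) - 4):
--         if rank_sorted[i] - rank_sorted[i + 4] == 4:
--             is_straight = True
--             break
--     if not is_straight and {14, 5, 4, 3, 2}.issubset(set(rank_histogram.keys())):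
--         is_straight = True  # Ace can be low in a 5-high straight
--
--     most_common = sorted(((count, rank) for rank, count in rank_histogram.items()), reverse=True)
--
--     score = 0
--     if is_flush and is_straight:
--         score = 8000 + rank_sorted[0]  # Add top card rank to differentiate straight flushes
--     elif most_common[0][0] == 4:
--         score = 7000 + most_common[0][1]
--     elif most_common[0][0] == 3 and most_common[1][0] >= 2:
--         score = 6000 + most_common[0][1] * 100 + most_common[1][1]  # Higher weight to three-of-a-kind
--     elif is_flush:
--         score = 5000 + rank_sorted[0]  # Top card of the flush
--     elif is_straight:
--         score = 4000 + rank_sorted[0]  # Top card of the straight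
--     elif most_common[0][0] == 3:
--         score = 3000 + most_common[0][1]
--     elif most_common[0][0] == 2 and most_common[1][0] == 2:
--         score = 2000 + most_common[0][1] * 100 + most_common[1][1]
--     elif most_common[0][0] == 2:
--         score = 1000 + most_common[0][1]
--     else:
--         score = rank_sorted[0]
--
--     return score
-- ===== SOURCE B (Python) =====
-- def evaluate_high_hand(hand):
--     order = 'XX23456789TJQKA'
--     rank_count = {}
--     suit_count = {}
--     for card in hand:
--         if card[:2] == '10':
--             r, s = 10, card[2]
--         else:
--             r, s = order.index(card[0].upper()), card[1].upper()
--         rank_count[r] = rank_count.get(r, 0) + 1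
--         suit_count[s] = suit_count.get(s, 0) + 1
--
--     flush = max(suit_count.values()) >= 5
--     straight = any(all(lo + j in rank_count for j in range(5)) for lo in range(2, 11)) \
--         or all(r in rank_count for r in (14, 5, 4, 3, 2))
--     top = max(rank_count)
--
--     c1 = max(rank_count.values())
--     r1 = max(r for r in rank_count if rank_count[r] == c1)
--     c2, r2 = 0, 0
--     for r in rank_count:
--         if r != r1 and (rank_count[r], r) > (c2, r2):
--             c2, r2 = rank_count[r], r
--
--     if flush and straight:
--         return 8000 + top
--     if c1 == 4:
--         return 7000 + r1
--     if c1 == 3 and c2 >= 2: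
--         return 6000 + 100 * r1 + r2
--     if flush:
--         return 5000 + top
--     if straight:
--         return 4000 + top
--     if c1 == 3:
--         return 3000 + r1
--     if c1 == 2 and c2 == 2:
--         return 2000 + 100 * r1 + r2
--     if c1 == 2:
--         return 1000 + r1
--     return top
-- ===== Notes on version B (the rewrite author's own statement) =====
-- stated objective: alternative
-- what changed: Replaces A's three sorts (sort the parsed hand, sort the distinct ranks, sort the (count,rank) pairs) and 5-window scan by one unsorted counting pass, straight detection by direct presence tests of the nine possible 5-run windows plus the wheel, and max-selection of the top two (count,rank) pairs instead of building and sorting most_common.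
-- outside the precondition, e.g. on evaluate_high_hand([]): A raises IndexError, B raises ValueError; on evaluate_high_hand(['ZZ']): A raises KeyError, B raises ValueError; on evaluate_high_hand(['5S', '5H', '5D']): A raises IndexError, B returns 3005
import Mathlib
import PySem

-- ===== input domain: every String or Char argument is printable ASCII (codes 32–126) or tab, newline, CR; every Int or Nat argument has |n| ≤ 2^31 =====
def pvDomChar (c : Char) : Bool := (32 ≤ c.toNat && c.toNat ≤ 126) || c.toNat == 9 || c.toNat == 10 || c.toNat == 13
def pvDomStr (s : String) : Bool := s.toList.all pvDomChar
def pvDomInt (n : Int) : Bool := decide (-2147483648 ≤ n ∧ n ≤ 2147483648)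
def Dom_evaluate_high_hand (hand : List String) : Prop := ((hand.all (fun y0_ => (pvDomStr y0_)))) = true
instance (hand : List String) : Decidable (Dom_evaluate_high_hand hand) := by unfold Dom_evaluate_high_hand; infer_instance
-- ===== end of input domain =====

-- B replaces A's three sorts and 5-window scan by one unsorted counting pass, direct presence
-- tests for the nine possible straight windows, and max-selection of the top (count,rank) pairs.

-- ===== PORT A =====

def pvRanksA : PySem.Dict Char Int :=
  PySem.Dict.ofList [('2',2),('3',3),('4',4),('5',5),('6',6),('7',7),('8',8),('9',9),
                     ('T',10),('J',11),('Q',12),('K',13),('A',14)]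

-- card -> (ranks[rank], suit); where Python raises (short card / bad rank key) the PySem
-- primitives return none and we take a junk default — those inputs are outside Pre_.
def pvParseA (card : String) : Int × Char :=
  if PySem.Str.startswith card "10" then
    ((pvRanksA.get? 'T').getD 0, (PySem.Str.pyGet? card 2).getD ' ')
  else
    ((pvRanksA.get? (PySem.Chars.upperChar ((PySem.Str.pyGet? card 0).getD ' '))).getD 0,
     PySem.Chars.upperChar ((PySem.Str.pyGet? card 1).getD ' '))

def pvParsedA (hand : List String) : List (Int × Char) :=
  hand.foldl (fun acc card => acc ++ [pvParseA card]) []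

-- one loop filling both histograms: rank_histogram[rank] = .get(rank,0)+1, same for suits
def pvStepA (h : PySem.Dict Int Int × PySem.Dict Char Int) (p : Int × Char) :
    PySem.Dict Int Int × PySem.Dict Char Int :=
  (h.1.insert p.1 (h.1.getD p.1 0 + 1), h.2.insert p.2 (h.2.getD p.2 0 + 1))

def evaluate_high_hand (hand : List String) : Int :=
  let parsedSorted := PySem.List.sorted2 (pvParsedA hand) (fun p => p.1) (fun p => p.2) true
  let hists := parsedSorted.foldl pvStepA (PySem.Dict.empty, PySem.Dict.empty)
  let rankHist := hists.1
  let suitHist := hists.2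
  let isFlush := suitHist.values.any (fun c => decide (5 ≤ c))
  let rankSorted := PySem.List.sorted rankHist.keys (fun x => x) true
  let scan := (PySem.List.pyRange 0 ((rankSorted.length : Int) - 4)).any
      (fun i => ((PySem.List.pyGet? rankSorted i).getD 0 - (PySem.List.pyGet? rankSorted (i + 4)).getD 0) == 4)
  let isStraight := if !scan &&
      PySem.Set.issubset (PySem.Set.ofList ([14, 5, 4, 3, 2] : List Int)) (PySem.Set.ofList rankHist.keys)
    then true else scan
  let mostCommon := PySem.List.sorted2 (rankHist.items.map (fun p => (p.2, p.1))) (fun p => p.1) (fun p => p.2) true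
  let m0 := (PySem.List.pyGet? mostCommon 0).getD (0, 0)
  let m1 := (PySem.List.pyGet? mostCommon 1).getD (0, 0)
  let top := (PySem.List.pyGet? rankSorted 0).getD 0
  if isFlush && isStraight then 8000 + top
  else if m0.1 = 4 then 7000 + m0.2
  else if m0.1 = 3 ∧ 2 ≤ m1.1 then 6000 + m0.2 * 100 + m1.2
  else if isFlush then 5000 + top
  else if isStraight then 4000 + top
  else if m0.1 = 3 then 3000 + m0.2
  else if m0.1 = 2 ∧ m1.1 = 2 then 2000 + m0.2 * 100 + m1.2
  else if m0.1 = 2 then 1000 + m0.2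
  else top

-- ===== PORT B =====

def pvOrderB : List Char := "XX23456789TJQKA".toList

def pvParseB (card : String) : Int × Char :=
  if PySem.List.slice card.toList (some 0) (some 2) = ['1', '0'] then
    (10, (PySem.Str.pyGet? card 2).getD ' ')
  else
    (((PySem.List.index? pvOrderB (PySem.Chars.upperChar ((PySem.Str.pyGet? card 0).getD ' '))).getD 0 : Nat),
     PySem.Chars.upperChar ((PySem.Str.pyGet? card 1).getD ' '))

def pvStepB (h : PySem.Dict Int Int × PySem.Dict Char Int) (p : Int × Char) :
    PySem.Dict Int Int × PySem.Dict Char Int :=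
  (h.1.insert p.1 (h.1.getD p.1 0 + 1), h.2.insert p.2 (h.2.getD p.2 0 + 1))

def evaluate_high_hand_alt (hand : List String) : Int :=
  let counts := hand.foldl (fun h card => pvStepB h (pvParseB card)) (PySem.Dict.empty, PySem.Dict.empty)
  let rankCount := counts.1
  let suitCount := counts.2
  let flush := decide (5 ≤ (PySem.List.max? suitCount.values (fun x => x)).getD 0)
  let straight :=
    ((PySem.List.pyRange 2 11).any (fun lo => (PySem.List.pyRange 0 5).all (fun j => rankCount.contains (lo + j)))) ||
    (([14, 5, 4, 3, 2] : List Int).all (fun r => rankCount.contains r))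
  let top := (PySem.List.max? rankCount.keys (fun x => x)).getD 0
  let c1 := (PySem.List.max? rankCount.values (fun x => x)).getD 0
  let r1 := (PySem.List.max? (rankCount.keys.filter (fun r => decide (rankCount.getD r 0 = c1))) (fun x => x)).getD 0
  let p2 := rankCount.keys.foldl (fun (p : Int × Int) r =>
      if r ≠ r1 ∧ (p.1 < rankCount.getD r 0 ∨ (p.1 = rankCount.getD r 0 ∧ p.2 < r)) then (rankCount.getD r 0, r) else p)
    (0, 0)
  if flush && straight then 8000 + top
  else if c1 = 4 then 7000 + r1
  else if c1 = 3 ∧ 2 ≤ p2.1 then 6000 + 100 * r1 + p2.2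
  else if flush then 5000 + top
  else if straight then 4000 + top
  else if c1 = 3 then 3000 + r1
  else if c1 = 2 ∧ p2.1 = 2 then 2000 + 100 * r1 + p2.2
  else if c1 = 2 then 1000 + r1
  else top

-- ===== PRECONDITION & SPEC =====

def pvRankChars : List Char := ['2','3','4','5','6','7','8','9','T','J','Q','K','A']

-- a card string Python A parses without raising: '10'+suit, or at least 2 chars whose
-- first char uppercases to a rank symbol
def pvValidCard (cs : List Char) : Bool :=
  match cs with
  | c :: d :: rest =>
    if c = '1' ∧ d = '0' ∧ rest ≠ [] then true
    else pvRankChars.contains (PySem.Chars.upperChar c)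
  | _ => false

def pvRankOfPre (cs : List Char) : Int :=
  match cs with
  | c :: d :: rest =>
    if c = '1' ∧ d = '0' ∧ rest ≠ [] then 10
    else ((['X','X','2','3','4','5','6','7','8','9','T','J','Q','K','A'].idxOf (PySem.Chars.upperChar c) : Nat) : Int)
  | _ => -1

-- Pre_ excludes exactly the inputs where Python A raises: malformed cards (KeyError/IndexError
-- while parsing), the empty hand (IndexError on most_common[0]), and 2- or 3-card hands all of
-- one rank (IndexError on most_common[1]).
def Pre_evaluate_high_hand (hand : List String) : Prop :=
  hand ≠ [] ∧ (∀ card ∈ hand, pvValidCard card.toList = true) ∧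
  ¬((hand.length = 2 ∨ hand.length = 3) ∧
    ∀ card ∈ hand, pvRankOfPre card.toList = pvRankOfPre hand.headI.toList)

instance (hand : List String) : Decidable (Pre_evaluate_high_hand hand) := by
  unfold Pre_evaluate_high_hand; infer_instance

def pvWitness_evaluate_high_hand : List String := ["AS", "KD", "10h", "3c", "3S"]

def Spec_evaluate_high_hand (hand : List String) (out : Int) : Prop := out = evaluate_high_hand_alt hand
instance (hand : List String) (out : Int) : Decidable (Spec_evaluate_high_hand hand out) := by
  unfold Spec_evaluate_high_hand; infer_instance

-- ===== CLAIM (what is proved, stated in full; the proofs are below) =====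
def Claim_equal_evaluate_high_hand : Prop := ∀ (hand : List String), Dom_evaluate_high_hand hand → Pre_evaluate_high_hand hand → Spec_evaluate_high_hand hand (evaluate_high_hand hand)

-- ===== LEMMAS AND PROOFS =====

set_option maxHeartbeats 1600000

-- ---- generic counting-dict facts (cite PySem fold lemmas) ----

theorem pv_cnt_getD {k : Type} [BEq k] [LawfulBEq k] (l : List k) (v : k) :
    (l.foldl (fun d x => d.insert x (d.getD x 0 + 1)) PySem.Dict.empty).getD v 0 = (l.count v : Int) := by
  rw [PySem.Dict.getD_foldl_insert_add_one]; simp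

theorem pv_cnt_keys {k : Type} [BEq k] [LawfulBEq k] (l : List k) :
    (l.foldl (fun d x => d.insert x (d.getD x 0 + 1)) (PySem.Dict.empty : PySem.Dict k Int)).keys
      = PySem.Set.ofList l := by
  rw [PySem.Dict.keys_foldl_insert]; simp [PySem.Set.update_nil_left]

theorem pv_cnt_nodup {k : Type} [BEq k] [LawfulBEq k] (l : List k) :
    (l.foldl (fun d x => d.insert x (d.getD x 0 + 1)) (PySem.Dict.empty : PySem.Dict k Int)).keys.Nodup := by
  rw [pv_cnt_keys]; exact PySem.Set.nodup_ofList l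

-- splitting the one histogram loop into its two independent dict folds

theorem pv_hists_A (l : List (Int × Char)) :
    l.foldl pvStepA (PySem.Dict.empty, PySem.Dict.empty)
      = ((l.map (fun p => p.1)).foldl (fun d x => d.insert x (d.getD x 0 + 1)) PySem.Dict.empty,
         (l.map (fun p => p.2)).foldl (fun d x => d.insert x (d.getD x 0 + 1)) PySem.Dict.empty) := by
  refine (PySem.List.foldl_prod_mk
      (f := fun (d : PySem.Dict Int Int) (p : Int × Char) => d.insert p.1 (d.getD p.1 0 + 1))
      (g := fun (d : PySem.Dict Char Int) (p : Int × Char) => d.insert p.2 (d.getD p.2 0 + 1))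
      l PySem.Dict.empty PySem.Dict.empty).trans ?_
  exact Prod.ext
    (List.foldl_map (f := fun p : Int × Char => p.1)
      (g := fun (d : PySem.Dict Int Int) x => d.insert x (d.getD x 0 + 1))).symm
    (List.foldl_map (f := fun p : Int × Char => p.2)
      (g := fun (d : PySem.Dict Char Int) x => d.insert x (d.getD x 0 + 1))).symm

theorem pv_hists_B (l : List (Int × Char)) :
    l.foldl pvStepB (PySem.Dict.empty, PySem.Dict.empty)
      = ((l.map (fun p => p.1)).foldl (fun d x => d.insert x (d.getD x 0 + 1)) PySem.Dict.empty,
         (l.map (fun p => p.2)).foldl (fun d x => d.insert x (d.getD x 0 + 1)) PySem.Dict.empty) := by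
  refine (PySem.List.foldl_prod_mk
      (f := fun (d : PySem.Dict Int Int) (p : Int × Char) => d.insert p.1 (d.getD p.1 0 + 1))
      (g := fun (d : PySem.Dict Char Int) (p : Int × Char) => d.insert p.2 (d.getD p.2 0 + 1))
      l PySem.Dict.empty PySem.Dict.empty).trans ?_
  exact Prod.ext
    (List.foldl_map (f := fun p : Int × Char => p.1)
      (g := fun (d : PySem.Dict Int Int) x => d.insert x (d.getD x 0 + 1))).symm
    (List.foldl_map (f := fun p : Int × Char => p.2)
      (g := fun (d : PySem.Dict Char Int) x => d.insert x (d.getD x 0 + 1))).symm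

-- ---- the two parses agree on valid cards ----

theorem pv_parse_valid {card : String} (h : pvValidCard card.toList = true) :
    pvParseB card = pvParseA card ∧ 2 ≤ (pvParseA card).1 ∧ (pvParseA card).1 ≤ 14 := by
  cases hcs : card.toList with
  | nil => rw [hcs] at h; simp [pvValidCard] at h
  | cons c rest =>
    cases rest with
    | nil => rw [hcs] at h; simp [pvValidCard] at h
    | cons d rest2 =>
      rw [hcs] at h
      by_cases h10 : c = '1' ∧ d = '0' ∧ rest2 ≠ []
      · obtain ⟨hc1, hd0, hr⟩ := h10
        obtain ⟨e, r3, hr3⟩ : ∃ e r3, rest2 = e :: r3 := by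
          cases rest2 with
          | nil => exact absurd rfl hr
          | cons e r3 => exact ⟨e, r3, rfl⟩
        subst hc1; subst hd0; subst hr3
        have hsw : PySem.Str.startswith card "10" = true := by
          show PySem.Chars.startswith card.toList ['1', '0'] = true
          rw [hcs]; simp [PySem.Chars.startswith, List.isPrefixOf]
        have hsl : PySem.List.slice card.toList (some 0) (some 2) = ['1', '0'] := by
          rw [hcs]; simp [PySem.List.slice, PySem.List.clampIdx]
        have hg2 : PySem.Str.pyGet? card 2 = some e := by
          show PySem.List.pyGet? card.toList 2 = some e
          rw [hcs]
          simp [PySem.List.pyGet?, PySem.List.pyIdx?,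
            show (2:Int) ≤ (r3.length : Int) + 1 + 1 by omega]
        have hA : pvParseA card = (10, e) := by
          unfold pvParseA
          rw [hsw, if_pos rfl, hg2]
          rfl
        have hB : pvParseB card = (10, e) := by
          unfold pvParseB
          rw [hsl, if_pos rfl]
          show (10, (PySem.List.pyGet? card.toList 2).getD ' ') = (10, e)
          rw [show PySem.List.pyGet? card.toList 2 = some e from hg2]
          rfl
        rw [hA, hB]
        exact ⟨rfl, by norm_num, by norm_num⟩
      · have hne : ¬(c = '1' ∧ d = '0') := by
          rintro ⟨hc1, hd0⟩
          have hr : rest2 = [] := by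
            by_contra hr; exact h10 ⟨hc1, hd0, hr⟩
          subst hc1; subst hd0; subst hr
          simp [pvValidCard, pvRankChars] at h
          revert h; decide
        have hval' : pvRankChars.contains (PySem.Chars.upperChar c) = true := by
          simpa [pvValidCard, h10] using h
        have hsw : PySem.Str.startswith card "10" = false := by
          show PySem.Chars.startswith card.toList ['1', '0'] = false
          rw [hcs]
          simp only [PySem.Chars.startswith, List.isPrefixOf, Bool.and_eq_false_iff,
            beq_eq_false_iff_ne, ne_eq]
          by_cases hc : c = '1'
          · subst hc
            right; left
            intro hd; exact hne ⟨rfl, hd.symm⟩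
          · left; intro hc'; exact hc hc'.symm
        have hg0 : PySem.Str.pyGet? card 0 = some c := by
          show PySem.List.pyGet? card.toList 0 = some c
          rw [hcs]
          simp only [PySem.List.pyGet?, PySem.List.pyIdx?]
          split_ifs with hif <;> simp_all <;> omega
        have hg1 : PySem.Str.pyGet? card 1 = some d := by
          show PySem.List.pyGet? card.toList 1 = some d
          rw [hcs]
          simp only [PySem.List.pyGet?, PySem.List.pyIdx?]
          split_ifs with hif <;> simp_all <;> omega
        have hsl : PySem.List.slice card.toList (some 0) (some 2) = [c, d] := by
          rw [hcs]; simp [PySem.List.slice, PySem.List.clampIdx]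
        have hA : pvParseA card
            = ((pvRanksA.get? (PySem.Chars.upperChar c)).getD 0, PySem.Chars.upperChar d) := by
          unfold pvParseA
          rw [hsw, hg0, hg1]
          simp
        have hB : pvParseB card
            = ((((PySem.List.index? pvOrderB (PySem.Chars.upperChar c)).getD 0 : Nat) : Int),
               PySem.Chars.upperChar d) := by
          unfold pvParseB
          rw [hsl, if_neg (by intro hh; simp at hh; exact hne ⟨hh.1, hh.2⟩), hg0, hg1]
          simp
        have hu : PySem.Chars.upperChar c ∈ pvRankChars := by
          simpa using hval'
        have hfst : ∃ n : Int, (pvRanksA.get? (PySem.Chars.upperChar c)).getD 0 = n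
            ∧ (((PySem.List.index? pvOrderB (PySem.Chars.upperChar c)).getD 0 : Nat) : Int) = n
            ∧ 2 ≤ n ∧ n ≤ 14 := by
          simp only [pvRankChars, List.mem_cons, List.not_mem_nil, or_false] at hu
          rcases hu with hu|hu|hu|hu|hu|hu|hu|hu|hu|hu|hu|hu|hu <;>
            (rw [hu]; exact ⟨_, rfl, by decide, by decide, by decide⟩)
        obtain ⟨n, hn1, hn2, hb1, hb2⟩ := hfst
        refine ⟨?_, ?_, ?_⟩
        · rw [hA, hB, hn1, hn2]
        · rw [hA]
          show 2 ≤ (pvRanksA.get? (PySem.Chars.upperChar c)).getD 0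
          rw [hn1]; exact hb1
        · rw [hA]
          show (pvRanksA.get? (PySem.Chars.upperChar c)).getD 0 ≤ 14
          rw [hn1]; exact hb2

-- ---- lexicographic order on (count, rank) pairs ----

def pvLexLe (p q : Int × Int) : Prop := p.1 < q.1 ∨ (p.1 = q.1 ∧ p.2 ≤ q.2)

theorem pvLexLe_refl (p : Int × Int) : pvLexLe p p := by unfold pvLexLe; omega

theorem pvLexLe_trans {p q r : Int × Int} (h1 : pvLexLe p q) (h2 : pvLexLe q r) : pvLexLe p r := by
  unfold pvLexLe at *; omega

theorem pvLexLe_antisymm {p q : Int × Int} (h1 : pvLexLe p q) (h2 : pvLexLe q p) : p = q := by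
  obtain ⟨a, b⟩ := p; obtain ⟨c, d⟩ := q
  unfold pvLexLe at h1 h2; simp only [Prod.mk.injEq]
  constructor <;> omega

theorem pvLexLe_of_not_lt {p q : Int × Int} (h : ¬(p.1 < q.1 ∨ (p.1 = q.1 ∧ p.2 < q.2))) :
    pvLexLe q p := by unfold pvLexLe; omega

theorem pv_ite_or (a b : Bool) : (if (!a && b) = true then true else a) = (a || b) := by
  cases a <;> cases b <;> rfl

-- ---- pairwise order of the insertion sort used by sorted2 ----

theorem pv_insertBy_pairwise {α : Type} (R : α → α → Prop) (before : α → α → Bool)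
    (h1 : ∀ a b, before a b = true → R a b) (h2 : ∀ a b, before a b = false → R b a)
    (ht : ∀ a b c, R a b → R b c → R a c)
    (x : α) (l : List α) (hl : l.Pairwise R) :
    (PySem.List.insertBy before x l).Pairwise R := by
  induction l with
  | nil => simp [PySem.List.insertBy]
  | cons y ys ih =>
    obtain ⟨hy, hys⟩ := List.pairwise_cons.mp hl
    by_cases hb : before x y = true
    · rw [PySem.List.insertBy, if_pos hb]
      refine List.pairwise_cons.mpr ⟨?_, hl⟩
      intro z hz
      rcases List.mem_cons.mp hz with rfl | hz'
      · exact h1 _ _ hb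
      · exact ht _ _ _ (h1 _ _ hb) (hy z hz')
    · rw [PySem.List.insertBy, if_neg hb]
      refine List.pairwise_cons.mpr ⟨?_, ih hys⟩
      intro z hz
      rcases (PySem.List.mem_insertBy _ _ _ _).mp hz with rfl | hz'
      · exact h2 _ _ (Bool.eq_false_iff.mpr hb)
      · exact hy z hz'

theorem pv_foldl_insertBy_pairwise {α : Type} (R : α → α → Prop) (before : α → α → Bool)
    (h1 : ∀ a b, before a b = true → R a b) (h2 : ∀ a b, before a b = false → R b a)
    (ht : ∀ a b c, R a b → R b c → R a c) :
    ∀ (xs : List α) (acc : List α), acc.Pairwise R →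
      (xs.foldl (fun a x => PySem.List.insertBy before x a) acc).Pairwise R := by
  intro xs
  induction xs with
  | nil => intro acc h; simpa using h
  | cons x xs ih =>
    intro acc hacc
    simp only [List.foldl_cons]
    exact ih _ (pv_insertBy_pairwise R before h1 h2 ht x acc hacc)

theorem pv_sorted2_pairwise (xs : List (Int × Int)) :
    (PySem.List.sorted2 xs (fun p => p.1) (fun p => p.2) true).Pairwise (fun a b => pvLexLe b a) := by
  have hdef : PySem.List.sorted2 xs (fun p => p.1) (fun p => p.2) true
      = xs.foldl (fun acc x => PySem.List.insertBy
          (fun a b => (decide (b.1 < a.1) || (!decide (a.1 < b.1) && decide (b.2 < a.2)))) x acc) [] := rfl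
  rw [hdef]
  apply pv_foldl_insertBy_pairwise
  · intro a b hb
    obtain ⟨a1, a2⟩ := a; obtain ⟨b1, b2⟩ := b
    unfold pvLexLe; simp at hb; omega
  · intro a b hb
    obtain ⟨a1, a2⟩ := a; obtain ⟨b1, b2⟩ := b
    unfold pvLexLe; simp at hb; omega
  · intro a b c hab hbc; exact pvLexLe_trans hbc hab
  · exact List.Pairwise.nil

-- ---- straight-run lemmas on a strictly descending list ----

theorem pv_desc_step {l : List Int} {c b : Int} (hpw : l.Pairwise (· > ·))
    (hub : ∀ y ∈ l, y < c) (hm : b ∈ l) (hb : c - 1 ≤ b) : ∃ t, l = b :: t := by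
  cases l with
  | nil => simp at hm
  | cons e es =>
    have he : e < c := hub e List.mem_cons_self
    rcases List.mem_cons.mp hm with h | h
    · exact ⟨es, by rw [h]⟩
    · have hgt : e > b := (List.pairwise_cons.mp hpw).1 _ h
      exact absurd hgt (by omega)

theorem pv_scan_of_run (l : List Int) (hpw : l.Pairwise (· > ·)) (lo : Int)
    (h : ∀ j : Nat, j < 5 → lo + (j : Int) ∈ l) :
    ∃ i : Nat, l[i]? = some (lo + 4) ∧ l[i + 4]? = some lo := by
  induction l with
  | nil => have h0 := h 0 (by norm_num); simp at h0
  | cons x xs ih =>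
    have hpw' : xs.Pairwise (· > ·) := (List.pairwise_cons.mp hpw).2
    have hhd : ∀ y ∈ xs, x > y := (List.pairwise_cons.mp hpw).1
    by_cases hx : x = lo + 4
    · have hub1 : ∀ y ∈ xs, y < lo + 4 := fun y hy => hx ▸ hhd y hy
      have hm3 : lo + 3 ∈ xs := by
        have h3 := h 3 (by norm_num); push_cast at h3
        rcases List.mem_cons.mp h3 with he | hm
        · exact absurd he (by omega)
        · exact hm
      obtain ⟨t1, ht1⟩ := pv_desc_step hpw' hub1 hm3 (by omega)
      have hpw1 : t1.Pairwise (· > ·) := by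
        rw [ht1] at hpw'; exact (List.pairwise_cons.mp hpw').2
      have hub2 : ∀ y ∈ t1, y < lo + 3 := by
        rw [ht1] at hpw'; exact (List.pairwise_cons.mp hpw').1
      have hm2 : lo + 2 ∈ t1 := by
        have h2 := h 2 (by norm_num); push_cast at h2
        rcases List.mem_cons.mp h2 with he | hm
        · exact absurd he (by omega)
        · rw [ht1] at hm; rcases List.mem_cons.mp hm with he | hm'
          · exact absurd he (by omega)
          · exact hm'
      obtain ⟨t2, ht2⟩ := pv_desc_step hpw1 hub2 hm2 (by omega)
      have hpw2 : t2.Pairwise (· > ·) := by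
        rw [ht2] at hpw1; exact (List.pairwise_cons.mp hpw1).2
      have hub3 : ∀ y ∈ t2, y < lo + 2 := by
        rw [ht2] at hpw1; exact (List.pairwise_cons.mp hpw1).1
      have hm1 : lo + 1 ∈ t2 := by
        have h1 := h 1 (by norm_num); push_cast at h1
        rcases List.mem_cons.mp h1 with he | hm
        · exact absurd he (by omega)
        · rw [ht1] at hm; rcases List.mem_cons.mp hm with he | hm'
          · exact absurd he (by omega)
          · rw [ht2] at hm'; rcases List.mem_cons.mp hm' with he | hm''
            · exact absurd he (by omega)
            · exact hm''
      obtain ⟨t3, ht3⟩ := pv_desc_step hpw2 hub3 hm1 (by omega)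
      have hpw3 : t3.Pairwise (· > ·) := by
        rw [ht3] at hpw2; exact (List.pairwise_cons.mp hpw2).2
      have hub4 : ∀ y ∈ t3, y < lo + 1 := by
        rw [ht3] at hpw2; exact (List.pairwise_cons.mp hpw2).1
      have hm0 : lo ∈ t3 := by
        have h0 := h 0 (by norm_num); push_cast at h0
        simp only [add_zero] at h0
        rcases List.mem_cons.mp h0 with he | hm
        · exact absurd he (by omega)
        · rw [ht1] at hm; rcases List.mem_cons.mp hm with he | hm'
          · exact absurd he (by omega)
          · rw [ht2] at hm'; rcases List.mem_cons.mp hm' with he | hm''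
            · exact absurd he (by omega)
            · rw [ht3] at hm''; rcases List.mem_cons.mp hm'' with he | hm3
              · exact absurd he (by omega)
              · exact hm3
      obtain ⟨t4, ht4⟩ := pv_desc_step hpw3 hub4 hm0 (by omega)
      refine ⟨0, ?_, ?_⟩
      · simp [hx]
      · simp [ht1, ht2, ht3, ht4]
    · have h4 := h 4 (by norm_num); push_cast at h4
      have hgt : lo + 4 < x := by
        rcases List.mem_cons.mp h4 with he | hm
        · exact absurd he.symm hx
        · exact hhd _ hm
      have h' : ∀ j : Nat, j < 5 → lo + (j : Int) ∈ xs := by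
        intro j hj
        have hj4 : (j : Int) ≤ 4 := by exact_mod_cast Nat.lt_succ_iff.mp hj
        rcases List.mem_cons.mp (h j hj) with he | hm
        · exact absurd he (by omega)
        · exact hm
      obtain ⟨i, h1, h2⟩ := ih hpw' h'
      exact ⟨i + 1, by simpa using h1, by simpa using h2⟩

theorem pv_run_of_scan (l : List Int) (hpw : l.Pairwise (· > ·)) {i : Nat}
    (h5 : i + 4 < l.length)
    (heq : l[i]'(by omega) - l[i + 4]'h5 = 4) :
    ∀ j : Nat, j < 5 → (l[i + 4]'h5) + (j : Int) ∈ l := by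
  have hg := List.pairwise_iff_getElem.mp hpw
  have c1 : l[i]'(by omega) > l[i + 1]'(by omega) := hg i (i + 1) (by omega) (by omega) (by omega)
  have c2 : l[i + 1]'(by omega) > l[i + 2]'(by omega) := hg (i + 1) (i + 2) (by omega) (by omega) (by omega)
  have c3 : l[i + 2]'(by omega) > l[i + 3]'(by omega) := hg (i + 2) (i + 3) (by omega) (by omega) (by omega)
  have c4 : l[i + 3]'(by omega) > l[i + 4]'h5 := hg (i + 3) (i + 4) (by omega) (by omega) (by omega)
  intro j hj
  interval_cases j
  · simp only [Nat.cast_zero, add_zero]; exact List.getElem_mem h5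
  · have e3 : l[i + 3]'(by omega) = l[i + 4]'h5 + 1 := by omega
    rw [show ((1 : Nat) : Int) = 1 from rfl, ← e3]
    exact List.getElem_mem (by omega)
  · have e2 : l[i + 2]'(by omega) = l[i + 4]'h5 + 2 := by omega
    rw [show ((2 : Nat) : Int) = 2 from rfl, ← e2]
    exact List.getElem_mem (by omega)
  · have e1 : l[i + 1]'(by omega) = l[i + 4]'h5 + 3 := by omega
    rw [show ((3 : Nat) : Int) = 3 from rfl, ← e1]
    exact List.getElem_mem (by omega)
  · have e0 : l[i]'(by omega) = l[i + 4]'h5 + 4 := by omega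
    rw [show ((4 : Nat) : Int) = 4 from rfl, ← e0]
    exact List.getElem_mem (by omega)

-- ---- the running second-best loop is a lexicographic max ----

theorem pv_fold_best (cnt : Int → Int) (r1 : Int) (l : List Int) :
    ∀ p0 : Int × Int,
      ((l.foldl (fun p r =>
          if r ≠ r1 ∧ (p.1 < cnt r ∨ (p.1 = cnt r ∧ p.2 < r)) then (cnt r, r) else p) p0) = p0
        ∨ ∃ r ∈ l, r ≠ r1 ∧ (l.foldl (fun p r =>
          if r ≠ r1 ∧ (p.1 < cnt r ∨ (p.1 = cnt r ∧ p.2 < r)) then (cnt r, r) else p) p0) = (cnt r, r))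
      ∧ pvLexLe p0 (l.foldl (fun p r =>
          if r ≠ r1 ∧ (p.1 < cnt r ∨ (p.1 = cnt r ∧ p.2 < r)) then (cnt r, r) else p) p0)
      ∧ ∀ r ∈ l, r ≠ r1 → pvLexLe (cnt r, r) (l.foldl (fun p r =>
          if r ≠ r1 ∧ (p.1 < cnt r ∨ (p.1 = cnt r ∧ p.2 < r)) then (cnt r, r) else p) p0) := by
  induction l with
  | nil =>
    intro p0
    refine ⟨Or.inl rfl, pvLexLe_refl p0, ?_⟩
    intro r hr; simp at hr
  | cons x xs ih =>
    intro p0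
    simp only [List.foldl_cons]
    obtain ⟨hmem, hle, hmax⟩ := ih (if x ≠ r1 ∧ (p0.1 < cnt x ∨ (p0.1 = cnt x ∧ p0.2 < x)) then (cnt x, x) else p0)
    refine ⟨?_, ?_, ?_⟩
    · rcases hmem with hm | ⟨r, hr, hrne, hm⟩
      · by_cases hc : x ≠ r1 ∧ (p0.1 < cnt x ∨ (p0.1 = cnt x ∧ p0.2 < x))
        · exact Or.inr ⟨x, List.mem_cons_self, hc.1, hm.trans (if_pos hc)⟩
        · exact Or.inl (hm.trans (if_neg hc))
      · exact Or.inr ⟨r, List.mem_cons_of_mem _ hr, hrne, hm⟩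
    · refine pvLexLe_trans ?_ hle
      by_cases hc : x ≠ r1 ∧ (p0.1 < cnt x ∨ (p0.1 = cnt x ∧ p0.2 < x))
      · rw [if_pos hc]; unfold pvLexLe; omega
      · rw [if_neg hc]; exact pvLexLe_refl p0
    · intro r hr hrne
      rcases List.mem_cons.mp hr with rfl | hr'
      · refine pvLexLe_trans ?_ hle
        by_cases hc : r ≠ r1 ∧ (p0.1 < cnt r ∨ (p0.1 = cnt r ∧ p0.2 < r))
        · rw [if_pos hc]; exact pvLexLe_refl _
        · rw [if_neg hc]
          have : ¬(p0.1 < cnt r ∨ (p0.1 = cnt r ∧ p0.2 < r)) := fun hlt => hc ⟨hrne, hlt⟩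
          exact pvLexLe_of_not_lt this
      · exact hmax r hr' hrne

theorem pv_nodup_single {l : List Int} (hnd : l.Nodup) {k : Int} (hk : k ∈ l)
    (hall : ∀ v ∈ l, v = k) : l = [k] := by
  cases l with
  | nil => simp at hk
  | cons a as =>
    have ha : a = k := hall a List.mem_cons_self
    cases as with
    | nil => rw [ha]
    | cons b bs =>
      have hb : b = k := hall b (List.mem_cons_of_mem _ List.mem_cons_self)
      rw [List.nodup_cons] at hnd
      exact absurd (by rw [ha, hb]; exact List.mem_cons_self) hnd.1

-- ---- the bridge: both score expressions agree given matching histograms ----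

theorem pv_bridge
    (R : List Int) (S : List Char)
    (DA DB : PySem.Dict Int Int) (EA EB : PySem.Dict Char Int)
    (hRne : R ≠ []) (hSne : S ≠ [])
    (hRb : ∀ r ∈ R, 2 ≤ r ∧ r ≤ 14)
    (hDAg : ∀ v, DA.getD v 0 = (R.count v : Int)) (hDAk : ∀ v, v ∈ DA.keys ↔ v ∈ R)
    (hDAnd : DA.keys.Nodup)
    (hDBg : ∀ v, DB.getD v 0 = (R.count v : Int)) (hDBk : ∀ v, v ∈ DB.keys ↔ v ∈ R)
    (hDBnd : DB.keys.Nodup)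
    (hEAg : ∀ v, EA.getD v 0 = (S.count v : Int)) (hEAk : ∀ v, v ∈ EA.keys ↔ v ∈ S)
    (hEAnd : EA.keys.Nodup)
    (hEBg : ∀ v, EB.getD v 0 = (S.count v : Int)) (hEBk : ∀ v, v ∈ EB.keys ↔ v ∈ S)
    (hEBnd : EB.keys.Nodup) :
    (let isFlush := EA.values.any (fun c => decide (5 ≤ c));
     let rankSorted := PySem.List.sorted DA.keys (fun x => x) true;
     let scan := (PySem.List.pyRange 0 ((rankSorted.length : Int) - 4)).any
        (fun i => ((PySem.List.pyGet? rankSorted i).getD 0 - (PySem.List.pyGet? rankSorted (i + 4)).getD 0) == 4);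
     let isStraight := if !scan &&
        PySem.Set.issubset (PySem.Set.ofList ([14, 5, 4, 3, 2] : List Int)) (PySem.Set.ofList DA.keys)
       then true else scan;
     let mostCommon := PySem.List.sorted2 (DA.items.map (fun p => (p.2, p.1))) (fun p => p.1) (fun p => p.2) true;
     let m0 := (PySem.List.pyGet? mostCommon 0).getD (0, 0);
     let m1 := (PySem.List.pyGet? mostCommon 1).getD (0, 0);
     let top := (PySem.List.pyGet? rankSorted 0).getD 0;
     if isFlush && isStraight then 8000 + top
     else if m0.1 = 4 then 7000 + m0.2
     else if m0.1 = 3 ∧ 2 ≤ m1.1 then 6000 + m0.2 * 100 + m1.2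
     else if isFlush then 5000 + top
     else if isStraight then 4000 + top
     else if m0.1 = 3 then 3000 + m0.2
     else if m0.1 = 2 ∧ m1.1 = 2 then 2000 + m0.2 * 100 + m1.2
     else if m0.1 = 2 then 1000 + m0.2
     else top)
    =
    (let flush := decide (5 ≤ (PySem.List.max? EB.values (fun x => x)).getD 0);
     let straight := ((PySem.List.pyRange 2 11).any
          (fun lo => (PySem.List.pyRange 0 5).all (fun j => DB.contains (lo + j)))) ||
        (([14, 5, 4, 3, 2] : List Int).all (fun r => DB.contains r));
     let top := (PySem.List.max? DB.keys (fun x => x)).getD 0;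
     let c1 := (PySem.List.max? DB.values (fun x => x)).getD 0;
     let r1 := (PySem.List.max? (DB.keys.filter (fun r => decide (DB.getD r 0 = c1))) (fun x => x)).getD 0;
     let p2 := DB.keys.foldl (fun (p : Int × Int) r =>
          if r ≠ r1 ∧ (p.1 < DB.getD r 0 ∨ (p.1 = DB.getD r 0 ∧ p.2 < r)) then (DB.getD r 0, r) else p)
        (0, 0);
     if flush && straight then 8000 + top
     else if c1 = 4 then 7000 + r1
     else if c1 = 3 ∧ 2 ≤ p2.1 then 6000 + 100 * r1 + p2.2
     else if flush then 5000 + top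
     else if straight then 4000 + top
     else if c1 = 3 then 3000 + r1
     else if c1 = 2 ∧ p2.1 = 2 then 2000 + 100 * r1 + p2.2
     else if c1 = 2 then 1000 + r1
     else top) := by
  dsimp only
  -- FLUSH
  have hEAv : EA.values = EA.keys.map (fun k => EA.getD k 0) := PySem.Dict.values_eq_map_keys EA hEAnd 0
  have hEBv : EB.values = EB.keys.map (fun k => EB.getD k 0) := PySem.Dict.values_eq_map_keys EB hEBnd 0
  have hflushA : ((EA.values.any (fun c => decide (5 ≤ c))) = true) ↔ (∃ s ∈ S, 5 ≤ (S.count s : Int)) := by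
    rw [hEAv, List.any_eq_true]
    constructor
    · rintro ⟨c, hc, hc5⟩
      rw [List.mem_map] at hc; obtain ⟨k, hk, rfl⟩ := hc
      rw [decide_eq_true_eq, hEAg k] at hc5
      exact ⟨k, (hEAk k).mp hk, hc5⟩
    · rintro ⟨s, hs, h5⟩
      refine ⟨EA.getD s 0, List.mem_map_of_mem ((hEAk s).mpr hs), ?_⟩
      rw [decide_eq_true_eq, hEAg s]; exact h5
  have hSBkne : EB.keys ≠ [] := by
    obtain ⟨s0, hs0⟩ := List.exists_mem_of_ne_nil S hSne
    intro hk; have := (hEBk s0).mpr hs0; rw [hk] at this; simp at this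
  obtain ⟨mv, hmv⟩ : ∃ mv, PySem.List.max? EB.values (fun x => x) = some mv := by
    cases hcase : PySem.List.max? EB.values (fun x => x) with
    | none =>
      rw [PySem.List.max?_eq_none_iff, hEBv] at hcase
      exact absurd (List.map_eq_nil_iff.mp hcase) hSBkne
    | some mv => exact ⟨mv, rfl⟩
  have hflushB : (decide (5 ≤ (PySem.List.max? EB.values (fun x => x)).getD 0) = true)
      ↔ (∃ s ∈ S, 5 ≤ (S.count s : Int)) := by
    rw [hmv, decide_eq_true_eq]; simp only [Option.getD_some]
    constructor
    · intro h5
      have hmem := PySem.List.max?_mem hmv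
      rw [hEBv, List.mem_map] at hmem; obtain ⟨k, hk, hkv⟩ := hmem
      exact ⟨k, (hEBk k).mp hk, by rw [← hEBg k, hkv]; exact h5⟩
    · rintro ⟨s, hs, h5⟩
      have hle := PySem.List.max?_isMax hmv (EB.getD s 0)
        (by rw [hEBv]; exact List.mem_map_of_mem ((hEBk s).mpr hs))
      calc (5:Int) ≤ (S.count s : Int) := h5
        _ = EB.getD s 0 := (hEBg s).symm
        _ ≤ mv := hle
  have hflush : (EA.values.any (fun c => decide (5 ≤ c)))
      = decide (5 ≤ (PySem.List.max? EB.values (fun x => x)).getD 0) :=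
    Bool.eq_iff_iff.mpr (hflushA.trans hflushB.symm)
  -- RANKSORTED
  set L := PySem.List.sorted DA.keys (fun x => x) true with hLdef
  have hKAne : DA.keys ≠ [] := by
    obtain ⟨r0, hr0⟩ := List.exists_mem_of_ne_nil R hRne
    intro hk; have := (hDAk r0).mpr hr0; rw [hk] at this; simp at this
  have hLmem : ∀ v, v ∈ L ↔ v ∈ R := by
    intro v
    rw [hLdef, PySem.List.mem_sorted]
    exact hDAk v
  have hLnd : L.Nodup := by
    rw [hLdef]
    exact ((PySem.List.sorted_perm DA.keys (fun x => x) true).nodup_iff).mpr hDAnd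
  have hLpw : L.Pairwise (· > ·) := by
    have h1 := PySem.List.sorted_pairwise_rev DA.keys (fun x => x)
    rw [← hLdef] at h1
    have h2 := h1.and hLnd
    exact h2.imp (fun hab => lt_of_le_of_ne hab.1 (Ne.symm hab.2))
  obtain ⟨m, t, hmt⟩ : ∃ m t, L = m :: t := by
    cases hc : L with
    | nil =>
      exfalso
      obtain ⟨r0, hr0⟩ := List.exists_mem_of_ne_nil R hRne
      have := (hLmem r0).mpr hr0; rw [hc] at this; simp at this
    | cons a b => exact ⟨a, b, rfl⟩
  have hmmax : ∀ y ∈ R, y ≤ m := by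
    intro y hy
    have hmt' : PySem.List.sorted DA.keys (fun x => x) true = m :: t := by rw [← hLdef]; exact hmt
    exact PySem.List.key_head_sorted_rev_ge DA.keys (fun x => x) hmt' y ((hDAk y).mpr hy)
  have hmR : m ∈ R := (hLmem m).mp (by rw [hmt]; exact List.mem_cons_self)
  have htopA : (PySem.List.pyGet? L 0).getD 0 = m := by
    rw [hmt]; simp [PySem.List.pyGet?, PySem.List.pyIdx?]
  have hKBne : DB.keys ≠ [] := by
    intro hk; have := (hDBk m).mpr hmR; rw [hk] at this; simp at this
  obtain ⟨mb, hmb⟩ : ∃ mb, PySem.List.max? DB.keys (fun x => x) = some mb := by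
    cases hcase : PySem.List.max? DB.keys (fun x => x) with
    | none => rw [PySem.List.max?_eq_none_iff] at hcase; exact absurd hcase hKBne
    | some mb => exact ⟨mb, rfl⟩
  have htopB : (PySem.List.max? DB.keys (fun x => x)).getD 0 = m := by
    rw [hmb]; simp only [Option.getD_some]
    exact le_antisymm (hmmax mb ((hDBk mb).mp (PySem.List.max?_mem hmb)))
      (PySem.List.max?_isMax hmb m ((hDBk m).mpr hmR))
  -- STRAIGHT
  have hscan : ((PySem.List.pyRange 0 ((L.length : Int) - 4)).any
      (fun i => ((PySem.List.pyGet? L i).getD 0 - (PySem.List.pyGet? L (i + 4)).getD 0) == 4))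
      = ((PySem.List.pyRange 2 11).any
          (fun lo => (PySem.List.pyRange 0 5).all (fun j => DB.contains (lo + j)))) := by
    apply Bool.eq_iff_iff.mpr
    rw [List.any_eq_true, List.any_eq_true]
    constructor
    · rintro ⟨i, hiR, hcond⟩
      rw [PySem.List.mem_pyRange_one] at hiR
      obtain ⟨hi0, hilt⟩ := hiR
      have hieq : ((i.toNat : Nat) : Int) = i := Int.toNat_of_nonneg hi0
      have hb4 : i.toNat + 4 < L.length := by omega
      have g0 : PySem.List.pyGet? L i = some (L[i.toNat]'(by omega)) := by
        have hx := PySem.List.pyGet?_natCast L i.toNat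
        rw [hieq] at hx
        rw [hx]; exact List.getElem?_eq_getElem _
      have g4 : PySem.List.pyGet? L (i + 4) = some (L[i.toNat + 4]'hb4) := by
        have hx := PySem.List.pyGet?_natCast L (i.toNat + 4)
        rw [show ((i.toNat + 4 : Nat) : Int) = i + 4 by omega] at hx
        rw [hx]; exact List.getElem?_eq_getElem _
      rw [g0, g4] at hcond
      simp only [Option.getD_some, beq_iff_eq] at hcond
      have hrun := pv_run_of_scan L hLpw hb4 hcond
      have hloR : L[i.toNat + 4]'hb4 ∈ R := (hLmem _).mp (List.getElem_mem hb4)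
      have htopR : L[i.toNat]'(by omega) ∈ R := (hLmem _).mp (List.getElem_mem (by omega))
      refine ⟨L[i.toNat + 4]'hb4, ?_, ?_⟩
      · rw [PySem.List.mem_pyRange_one]
        have hb1 := hRb _ hloR
        have hb2 := hRb _ htopR
        omega
      · rw [List.all_eq_true]
        intro j hjR
        rw [PySem.List.mem_pyRange_one] at hjR
        rw [PySem.Dict.contains_iff_mem_keys]
        apply (hDBk _).mpr
        have hjn : L[i.toNat + 4]'hb4 + j = L[i.toNat + 4]'hb4 + ((j.toNat : Nat) : Int) := by omega
        rw [hjn]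
        exact (hLmem _).mp (hrun j.toNat (by omega))
    · rintro ⟨lo, hloR, hall⟩
      rw [PySem.List.mem_pyRange_one] at hloR
      rw [List.all_eq_true] at hall
      have hmemL : ∀ j : Nat, j < 5 → lo + (j : Int) ∈ L := by
        intro j hj
        apply (hLmem _).mpr
        apply (hDBk _).mp
        rw [← PySem.Dict.contains_iff_mem_keys]
        apply hall (j : Int)
        rw [PySem.List.mem_pyRange_one]
        constructor
        · exact_mod_cast Nat.zero_le j
        · exact_mod_cast hj
      obtain ⟨i, h0, h4⟩ := pv_scan_of_run L hLpw lo hmemL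
      obtain ⟨hlt4, hv4⟩ := List.getElem?_eq_some_iff.mp h4
      refine ⟨(i : Int), ?_, ?_⟩
      · rw [PySem.List.mem_pyRange_one]
        constructor
        · exact_mod_cast Nat.zero_le i
        · omega
      · dsimp only
        have g0 : PySem.List.pyGet? L (i : Int) = some (lo + 4) := by
          rw [PySem.List.pyGet?_natCast]; exact h0
        have g4 : PySem.List.pyGet? L ((i : Int) + 4) = some lo := by
          rw [show (i : Int) + 4 = ((i + 4 : Nat) : Int) by push_cast; ring, PySem.List.pyGet?_natCast]
          exact h4
        rw [g0, g4]
        simp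
  have hwheel : (PySem.Set.issubset (PySem.Set.ofList ([14, 5, 4, 3, 2] : List Int)) (PySem.Set.ofList DA.keys))
      = (([14, 5, 4, 3, 2] : List Int).all (fun r => DB.contains r)) := by
    apply Bool.eq_iff_iff.mpr
    rw [PySem.Set.issubset_iff, List.all_eq_true]
    constructor
    · intro hsub x hx
      have := hsub x ((PySem.Set.mem_ofList _ _).mpr hx)
      rw [PySem.Set.mem_ofList] at this
      rw [PySem.Dict.contains_iff_mem_keys]
      exact (hDBk x).mpr ((hDAk x).mp this)
    · intro hall x hx
      rw [PySem.Set.mem_ofList] at hx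
      rw [PySem.Set.mem_ofList]
      apply (hDAk x).mpr
      apply (hDBk x).mp
      rw [← PySem.Dict.contains_iff_mem_keys]
      exact hall x hx
  -- MOST COMMON
  have hQ : DA.items.map (fun p => (p.2, p.1)) = DA.keys.map (fun k => ((R.count k : Int), k)) := by
    rw [PySem.Dict.items_eq_map_keys DA hDAnd 0, List.map_map]
    apply List.map_congr_left
    intro k _
    simp [Function.comp, hDAg k]
  rw [hQ]
  set Q := DA.keys.map (fun k => ((R.count k : Int), k)) with hQdef
  set M := PySem.List.sorted2 Q (fun p => p.1) (fun p => p.2) true with hMdef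
  have hMperm : M.Perm Q := by rw [hMdef]; exact PySem.List.sorted2_perm Q _ _ _
  have hMpw : M.Pairwise (fun a b => pvLexLe b a) := by rw [hMdef]; exact pv_sorted2_pairwise Q
  have hQnd : Q.Nodup := by
    rw [hQdef]
    refine List.Nodup.map ?_ hDAnd
    intro a b hab
    simpa using congrArg Prod.snd hab
  have hMnd : M.Nodup := (hMperm.nodup_iff).mpr hQnd
  -- c1 on the B side
  have hDBv : DB.values = DB.keys.map (fun k => DB.getD k 0) := PySem.Dict.values_eq_map_keys DB hDBnd 0
  obtain ⟨cv, hcv⟩ : ∃ cv, PySem.List.max? DB.values (fun x => x) = some cv := by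
    cases hcase : PySem.List.max? DB.values (fun x => x) with
    | none =>
      rw [PySem.List.max?_eq_none_iff, hDBv] at hcase
      exact absurd (List.map_eq_nil_iff.mp hcase) hKBne
    | some cv => exact ⟨cv, rfl⟩
  set c1val := (PySem.List.max? DB.values (fun x => x)).getD 0 with hc1def
  have hc1e : c1val = cv := by rw [hc1def, hcv]; rfl
  obtain ⟨k0, hk0K, hk0c⟩ : ∃ k0, k0 ∈ DB.keys ∧ DB.getD k0 0 = cv := by
    have := PySem.List.max?_mem hcv
    rw [hDBv, List.mem_map] at this
    obtain ⟨k, hk, hkv⟩ := this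
    exact ⟨k, hk, hkv⟩
  have hcmax : ∀ k ∈ DB.keys, DB.getD k 0 ≤ cv := by
    intro k hk
    exact PySem.List.max?_isMax hcv (DB.getD k 0) (by rw [hDBv]; exact List.mem_map_of_mem hk)
  -- r1 on the B side
  set F := DB.keys.filter (fun r => decide (DB.getD r 0 = c1val)) with hFdef
  have hk0F : k0 ∈ F := by
    rw [hFdef]
    exact List.mem_filter.mpr ⟨hk0K, by rw [decide_eq_true_eq, hk0c, hc1e]⟩
  obtain ⟨rv, hrv⟩ : ∃ rv, PySem.List.max? F (fun x => x) = some rv := by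
    cases hcase : PySem.List.max? F (fun x => x) with
    | none =>
      rw [PySem.List.max?_eq_none_iff] at hcase
      rw [hcase] at hk0F; simp at hk0F
    | some rv => exact ⟨rv, rfl⟩
  set r1val := (PySem.List.max? F (fun x => x)).getD 0 with hr1def
  have hr1e : r1val = rv := by rw [hr1def, hrv]; rfl
  have hrvF := PySem.List.max?_mem hrv
  have hrvK : rv ∈ DB.keys := (List.mem_filter.mp hrvF).1
  have hrvc : DB.getD rv 0 = cv := by
    have := (List.mem_filter.mp hrvF).2
    rw [decide_eq_true_eq] at this
    rw [this, hc1e]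
  have hrmax : ∀ k ∈ DB.keys, DB.getD k 0 = cv → k ≤ rv := by
    intro k hk hkc
    exact PySem.List.max?_isMax hrv k (List.mem_filter.mpr ⟨hk, by rw [decide_eq_true_eq, hkc, hc1e]⟩)
  -- q0 is (c1, r1)
  have hKAQ : ∀ k, k ∈ DB.keys ↔ k ∈ DA.keys := fun k => (hDBk k).trans (hDAk k).symm
  obtain ⟨q0, M', hM⟩ : ∃ q0 M', M = q0 :: M' := by
    cases hc : M with
    | nil =>
      exfalso
      have hQnil : Q = [] := (hc ▸ hMperm).symm.eq_nil
      rw [hQdef] at hQnil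
      exact hKAne (List.map_eq_nil_iff.mp hQnil)
    | cons a b => exact ⟨a, b, rfl⟩
  have hq0max : ∀ q ∈ Q, pvLexLe q q0 := by
    intro q hq
    have hqM : q ∈ M := hMperm.mem_iff.mpr hq
    rw [hM] at hqM
    rcases List.mem_cons.mp hqM with rfl | hq'
    · exact pvLexLe_refl _
    · have hMpw' : (q0 :: M').Pairwise (fun a b => pvLexLe b a) := by rw [← hM]; exact hMpw
      exact (List.pairwise_cons.mp hMpw').1 q hq'
  have hq0Q : q0 ∈ Q := hMperm.mem_iff.mp (by rw [hM]; exact List.mem_cons_self)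
  have hcntQ : ∀ k ∈ DB.keys, ((R.count k : Int), k) ∈ Q := by
    intro k hk
    rw [hQdef]
    exact List.mem_map_of_mem ((hKAQ k).mp hk)
  have hq0eq : q0 = (cv, rv) := by
    obtain ⟨kq, hkqA, hkq⟩ : ∃ kq, kq ∈ DA.keys ∧ ((R.count kq : Int), kq) = q0 := by
      rw [hQdef, List.mem_map] at hq0Q
      obtain ⟨k, hk, he⟩ := hq0Q
      exact ⟨k, hk, he⟩
    have hkqB : kq ∈ DB.keys := (hKAQ kq).mpr hkqA
    have h1 : pvLexLe q0 (cv, rv) := by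
      rw [← hkq]
      have hle : (R.count kq : Int) ≤ cv := by rw [← hDBg kq]; exact hcmax kq hkqB
      rcases lt_or_eq_of_le hle with hlt | heq
      · exact Or.inl hlt
      · exact Or.inr ⟨heq, hrmax kq hkqB (by rw [hDBg kq, heq])⟩
    have h2 : pvLexLe (cv, rv) q0 := by
      have hmemQ : ((R.count rv : Int), rv) ∈ Q := hcntQ rv hrvK
      have hcvr : (R.count rv : Int) = cv := by rw [← hDBg rv]; exact hrvc
      have := hq0max _ hmemQ
      rw [hcvr] at this
      exact this
    exact pvLexLe_antisymm h1 h2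
  have hm0 : (PySem.List.pyGet? M 0).getD (0, 0) = (c1val, r1val) := by
    rw [hM]
    have : (PySem.List.pyGet? (q0 :: M') 0).getD (0, 0) = q0 := by
      simp [PySem.List.pyGet?, PySem.List.pyIdx?]
    rw [this, hq0eq, hc1e, hr1e]
  -- second best
  obtain ⟨hp2mem, hp2ge, hp2max⟩ := pv_fold_best (fun r => DB.getD r 0) r1val DB.keys (0, 0)
  set p2v := DB.keys.foldl (fun (p : Int × Int) r =>
      if r ≠ r1val ∧ (p.1 < DB.getD r 0 ∨ (p.1 = DB.getD r 0 ∧ p.2 < r)) then (DB.getD r 0, r) else p)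
    (0, 0) with hp2def
  cases M' with
  | nil =>
    -- only one distinct rank
    have hallA : ∀ v ∈ DA.keys, v = rv := by
      intro v hv
      have hvQ : ((R.count v : Int), v) ∈ Q := by rw [hQdef]; exact List.mem_map_of_mem hv
      have hvM : ((R.count v : Int), v) ∈ M := hMperm.mem_iff.mpr hvQ
      rw [hM] at hvM
      rcases List.mem_cons.mp hvM with he | he
      · have := congrArg Prod.snd he
        simpa [hq0eq] using this
      · simp at he
    have hallB : ∀ v ∈ DB.keys, v = rv := fun v hv => hallA v ((hKAQ v).mp hv)
    have hDBkeys : DB.keys = [rv] := pv_nodup_single hDBnd hrvK hallB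
    have hm1 : (PySem.List.pyGet? M 1).getD (0, 0) = ((0 : Int), (0 : Int)) := by
      rw [hM]; simp [PySem.List.pyGet?, PySem.List.pyIdx?]
    have hp2v : p2v = ((0 : Int), (0 : Int)) := by
      rw [hp2def, hDBkeys]
      simp only [List.foldl_cons, List.foldl_nil]
      rw [if_neg]
      rintro ⟨hne', -⟩
      exact hne' (by rw [hr1e])
    rw [hflush, hscan, hwheel, pv_ite_or, htopA, htopB, hm0, hm1, hp2v]
    dsimp only
    split_ifs <;> ring
  | cons q1 M'' =>
    have hMpw' : (q0 :: q1 :: M'').Pairwise (fun a b => pvLexLe b a) := by rw [← hM]; exact hMpw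
    have hMnd' : (q0 :: q1 :: M'').Nodup := by rw [← hM]; exact hMnd
    have hq1Q : q1 ∈ Q := hMperm.mem_iff.mp (by rw [hM]; exact List.mem_cons_of_mem _ List.mem_cons_self)
    have hq0ne : q0 ≠ q1 := by
      rw [List.nodup_cons] at hMnd'
      exact fun he => hMnd'.1 (he ▸ List.mem_cons_self)
    have hq1max : ∀ q ∈ Q, q ≠ q0 → pvLexLe q q1 := by
      intro q hq hqne
      have hqM : q ∈ M := hMperm.mem_iff.mpr hq
      rw [hM] at hqM
      rcases List.mem_cons.mp hqM with rfl | hq'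
      · exact absurd rfl hqne
      · rcases List.mem_cons.mp hq' with rfl | hq''
        · exact pvLexLe_refl _
        · exact (List.pairwise_cons.mp (List.pairwise_cons.mp hMpw').2).1 q hq''
    obtain ⟨k1, hk1A, hk1⟩ : ∃ k1, k1 ∈ DA.keys ∧ ((R.count k1 : Int), k1) = q1 := by
      rw [hQdef, List.mem_map] at hq1Q
      obtain ⟨k, hk, he⟩ := hq1Q
      exact ⟨k, hk, he⟩
    have hk1B : k1 ∈ DB.keys := (hKAQ k1).mpr hk1A
    have hk1ne : k1 ≠ r1val := by
      intro he
      apply hq0ne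
      rw [hq0eq, ← hk1, he, hr1e,
        show (R.count rv : Int) = cv from by rw [← hDBg rv]; exact hrvc]
    have hle1 : pvLexLe q1 p2v := by
      have h := hp2max k1 hk1B hk1ne
      rw [hDBg k1, hk1] at h
      exact h
    have hle2 : pvLexLe p2v q1 := by
      rcases hp2mem with hz | ⟨r, hrK, hrne, hz⟩
      · rw [hz, ← hk1]
        left
        show (0 : Int) < (List.count k1 R : Int)
        have hk1R : k1 ∈ R := (hDAk k1).mp hk1A
        exact_mod_cast List.count_pos_iff.mpr hk1R
      · have hQr : ((R.count r : Int), r) ∈ Q := hcntQ r hrK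
        have hner : ((R.count r : Int), r) ≠ q0 := by
          rw [hq0eq]
          intro he
          have hr2 : r = rv := by simpa using congrArg Prod.snd he
          exact hrne (hr2.trans hr1e.symm)
        have h := hq1max _ hQr hner
        rw [hz, hDBg r]
        exact h
    have hp2q1 : p2v = q1 := pvLexLe_antisymm hle2 hle1
    have hm1 : (PySem.List.pyGet? M 1).getD (0, 0) = q1 := by
      rw [hM]; simp [PySem.List.pyGet?, PySem.List.pyIdx?]
    rw [hflush, hscan, hwheel, pv_ite_or, htopA, htopB, hm0, hm1, hp2q1]
    dsimp only
    split_ifs <;> ring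

-- ===== VERDICT (by name: the statement is the Claim_ definition above) =====
theorem evaluate_high_hand_spec : Claim_equal_evaluate_high_hand := by
  intro hand _hdom hpre
  obtain ⟨hne, hval, -⟩ := hpre
  unfold Spec_evaluate_high_hand
  have hmap : hand.map pvParseB = hand.map pvParseA :=
    List.map_congr_left (fun c hc => (pv_parse_valid (hval c hc)).1)
  have hparsedA : pvParsedA hand = hand.map pvParseA := by
    unfold pvParsedA; rw [PySem.List.foldl_append_singleton_eq_map]; simp
  have hRb : ∀ r ∈ (hand.map pvParseA).map (fun p => p.1), 2 ≤ r ∧ r ≤ 14 := by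
    intro r hr; rw [List.mem_map] at hr; obtain ⟨p, hp, rfl⟩ := hr
    rw [List.mem_map] at hp; obtain ⟨card, hcard, rfl⟩ := hp
    exact ⟨(pv_parse_valid (hval card hcard)).2.1, (pv_parse_valid (hval card hcard)).2.2⟩
  have hPne : hand.map pvParseA ≠ [] := fun h => hne (List.map_eq_nil_iff.mp h)
  show evaluate_high_hand hand = evaluate_high_hand_alt hand
  unfold evaluate_high_hand evaluate_high_hand_alt
  rw [hparsedA]
  rw [show (hand.foldl (fun h card => pvStepB h (pvParseB card)) (PySem.Dict.empty, PySem.Dict.empty))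
      = ((hand.map pvParseB).foldl pvStepB (PySem.Dict.empty, PySem.Dict.empty)) from (List.foldl_map).symm]
  rw [hmap]
  dsimp only
  rw [pv_hists_A, pv_hists_B]
  dsimp only
  have hperm : (PySem.List.sorted2 (hand.map pvParseA) (fun p => p.1) (fun p => p.2) true).Perm
      (hand.map pvParseA) := PySem.List.sorted2_perm _ _ _ _
  apply pv_bridge ((hand.map pvParseA).map (fun p => p.1)) ((hand.map pvParseA).map (fun p => p.2))
  · exact fun h => hPne (List.map_eq_nil_iff.mp h)
  · exact fun h => hPne (List.map_eq_nil_iff.mp h)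
  · exact hRb
  · intro v; rw [pv_cnt_getD]
    exact congrArg _ ((hperm.map (fun p => p.1)).count_eq v)
  · intro v; rw [pv_cnt_keys, PySem.Set.mem_ofList]
    exact (hperm.map (fun p => p.1)).mem_iff
  · exact pv_cnt_nodup _
  · intro v; rw [pv_cnt_getD]
  · intro v; rw [pv_cnt_keys, PySem.Set.mem_ofList]
  · exact pv_cnt_nodup _
  · intro v; rw [pv_cnt_getD]
    exact congrArg _ ((hperm.map (fun p => p.2)).count_eq v)
  · intro v; rw [pv_cnt_keys, PySem.Set.mem_ofList]
    exact (hperm.map (fun p => p.2)).mem_iff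
  · exact pv_cnt_nodup _
  · intro v; rw [pv_cnt_getD]
  · intro v; rw [pv_cnt_keys, PySem.Set.mem_ofList]
  · exact pv_cnt_nodup _
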